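-- pv_equiv track=rewrite | github.com/HolidayNiu/forecast_monitor_agent | agent/agents/intelligent_explainer_agent.py | _recommend_models
-- ===== SOURCE A (Python) =====
-- from typing import Dict, List, Optional
--
-- def _recommend_models(diagnostics: Dict, current_model: str) -> List[Dict]:
--     """
--     Recommend models based on detected issues.
--
--     Args:
--         diagnostics: Detector diagnostics results
--         current_model: Currently used model
--
--     Returns:
--         List of model recommendations with rationale
--     """
--     recommendations = []
--
--     # Get detected issues
--     detected_issues = []
--     for issue_type in ['trend_mismatch', 'missing_seasonality', 'volatility_mismatch', 'magnitude_mismatch']: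
--         if diagnostics.get(issue_type, {}).get('detected', False):
--             detected_issues.append(issue_type)
--
--     # Fixed model recommendations based on issues
--     if 'trend_mismatch' in detected_issues:
--         recommendations.append({
--             'model': 'HoltWinters',
--             'priority': 'high',
--             'rationale': 'HoltWinters excels at capturing both trend and seasonal patterns, addressing the detected trend mismatch issue.'
--         })
--
--     if 'missing_seasonality' in detected_issues:
--         recommendations.append({
--             'model': 'AutoETS',
--             'priority': 'high',
--             'rationale': 'AutoETS automatically selects optimal exponential smoothing with seasonal components, perfect for seasonality issues.'
--         })
--
--     if 'volatility_mismatch' in detected_issues or 'magnitude_mismatch' in detected_issues: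
--         recommendations.append({
--             'model': 'Holt',
--             'priority': 'medium',
--             'rationale': 'Holt method provides balanced trend modeling with appropriate smoothing for volatility concerns.'
--         })
--
--     # If no specific issues, provide general recommendations
--     if not recommendations:
--         recommendations = [
--             {
--                 'model': 'AutoETS',
--                 'priority': 'medium',
--                 'rationale': 'AutoETS provides robust automatic model selection for general forecasting improvements.'
--             },
--             {
--                 'model': 'HoltWinters',
--                 'priority': 'medium',
--                 'rationale': 'HoltWinters offers comprehensive trend and seasonal modeling capabilities.'
--             },
--             {
--                 'model': 'Holt',
--                 'priority': 'low',
--                 'rationale': 'Holt method provides simple yet effective trend-based forecasting.'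
--             }
--         ]
--
--     # Ensure we have exactly 3 recommendations (our fixed retrain list)
--     all_models = ['HoltWinters', 'AutoETS', 'Holt']
--     existing_models = [r['model'] for r in recommendations]
--
--     for model in all_models:
--         if model not in existing_models:
--             recommendations.append({
--                 'model': model,
--                 'priority': 'low',
--                 'rationale': f'{model} provides alternative forecasting approach for comparison.'
--             })
--
--     return recommendations[:3]  # Return top 3
-- ===== SOURCE B (Python) =====
-- # B: the result depends only on 3 booleans, so it is a single lookup in a
-- # precomputed 8-entry table of complete outputs (no incremental building,
-- # fallback substitution or padding loop).
--
-- def _rec(model, priority, rationale):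
--     return {'model': model, 'priority': priority, 'rationale': rationale}
--
-- _R_HW_HIGH = _rec('HoltWinters', 'high',
--     'HoltWinters excels at capturing both trend and seasonal patterns, addressing the detected trend mismatch issue.')
-- _R_ETS_HIGH = _rec('AutoETS', 'high',
--     'AutoETS automatically selects optimal exponential smoothing with seasonal components, perfect for seasonality issues.')
-- _R_HOLT_MED = _rec('Holt', 'medium',
--     'Holt method provides balanced trend modeling with appropriate smoothing for volatility concerns.')
-- _R_ETS_GEN = _rec('AutoETS', 'medium',
--     'AutoETS provides robust automatic model selection for general forecasting improvements.')
-- _R_HW_GEN = _rec('HoltWinters', 'medium',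
--     'HoltWinters offers comprehensive trend and seasonal modeling capabilities.')
-- _R_HOLT_GEN = _rec('Holt', 'low',
--     'Holt method provides simple yet effective trend-based forecasting.')
--
-- def _pad(model):
--     return _rec(model, 'low', f'{model} provides alternative forecasting approach for comparison.')
--
-- # key = (trend_detected, seasonality_detected, volatility_or_magnitude_detected)
-- _TABLE = {
--     (False, False, False): [_R_ETS_GEN, _R_HW_GEN, _R_HOLT_GEN],
--     (False, False, True):  [_R_HOLT_MED, _pad('HoltWinters'), _pad('AutoETS')],
--     (False, True,  False): [_R_ETS_HIGH, _pad('HoltWinters'), _pad('Holt')],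
--     (False, True,  True):  [_R_ETS_HIGH, _R_HOLT_MED, _pad('HoltWinters')],
--     (True,  False, False): [_R_HW_HIGH, _pad('AutoETS'), _pad('Holt')],
--     (True,  False, True):  [_R_HW_HIGH, _R_HOLT_MED, _pad('AutoETS')],
--     (True,  True,  False): [_R_HW_HIGH, _R_ETS_HIGH, _pad('Holt')],
--     (True,  True,  True):  [_R_HW_HIGH, _R_ETS_HIGH, _R_HOLT_MED],
-- }
--
-- def _recommend_models(diagnostics, current_model):
--     def det(k):
--         return bool(diagnostics.get(k, {}).get('detected', False))
--     key = (det('trend_mismatch'),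
--            det('missing_seasonality'),
--            det('volatility_mismatch') or det('magnitude_mismatch'))
--     return [dict(r) for r in _TABLE[key]]
-- ===== Notes on version B (the rewrite author's own statement) =====
-- stated objective: alternative
-- what changed: A builds the result incrementally (issue scan, branch chain of appends, empty-fallback substitution, padding loop over missing models, [:3] slice); B observes that the output depends only on three booleans and returns the corresponding complete 3-element list from a precomputed 8-entry lookup table, with no list construction logic at all.
import Mathlib
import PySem

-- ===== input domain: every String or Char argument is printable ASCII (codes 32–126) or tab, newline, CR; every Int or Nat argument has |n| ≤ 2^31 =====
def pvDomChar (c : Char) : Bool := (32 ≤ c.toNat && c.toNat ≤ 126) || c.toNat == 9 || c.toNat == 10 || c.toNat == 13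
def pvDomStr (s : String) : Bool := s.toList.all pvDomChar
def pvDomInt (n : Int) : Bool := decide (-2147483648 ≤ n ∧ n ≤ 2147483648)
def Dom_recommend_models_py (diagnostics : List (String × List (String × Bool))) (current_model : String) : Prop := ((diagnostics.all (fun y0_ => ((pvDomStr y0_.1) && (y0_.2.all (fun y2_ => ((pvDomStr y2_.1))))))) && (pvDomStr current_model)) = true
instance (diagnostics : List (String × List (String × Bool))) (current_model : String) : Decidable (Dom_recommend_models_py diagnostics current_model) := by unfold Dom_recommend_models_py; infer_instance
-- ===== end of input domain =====

-- B replaces A's incremental list construction by one lookup in a precomputed 8-entry table keyed by three booleans (alternative decomposition, same cost).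

-- ===== PORT A =====
-- diagnostics.get(k, {}).get('detected', False): first-match association-list lookup (dict convention)
def pyDetected (diagnostics : List (String × List (String × Bool))) (k : String) : Bool :=
  match (PySem.Dict.mk diagnostics).get? k with
  | some d => (PySem.Dict.mk d).getD "detected" false
  | none => false

def hwRec : List (String × String) :=
  [("model", "HoltWinters"), ("priority", "high"),
   ("rationale", "HoltWinters excels at capturing both trend and seasonal patterns, addressing the detected trend mismatch issue.")]

def etsRec : List (String × String) :=
  [("model", "AutoETS"), ("priority", "high"),
   ("rationale", "AutoETS automatically selects optimal exponential smoothing with seasonal components, perfect for seasonality issues.")]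

def holtRec : List (String × String) :=
  [("model", "Holt"), ("priority", "medium"),
   ("rationale", "Holt method provides balanced trend modeling with appropriate smoothing for volatility concerns.")]

def generalRecs : List (List (String × String)) :=
  [[("model", "AutoETS"), ("priority", "medium"),
    ("rationale", "AutoETS provides robust automatic model selection for general forecasting improvements.")],
   [("model", "HoltWinters"), ("priority", "medium"),
    ("rationale", "HoltWinters offers comprehensive trend and seasonal modeling capabilities.")],
   [("model", "Holt"), ("priority", "low"),
    ("rationale", "Holt method provides simple yet effective trend-based forecasting.")]]

def padRec (m : String) : List (String × String) :=
  [("model", m), ("priority", "low"),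
   ("rationale", m ++ " provides alternative forecasting approach for comparison.")]

def recommend_models_py (diagnostics : List (String × List (String × Bool))) (current_model : String) : List (List (String × String)) :=
  -- detected_issues loop
  let detected_issues :=
    ["trend_mismatch", "missing_seasonality", "volatility_mismatch", "magnitude_mismatch"].foldl
      (fun acc it => if pyDetected diagnostics it then acc ++ [it] else acc) []
  -- branch chain
  let recommendations : List (List (String × String)) := []
  let recommendations :=
    if detected_issues.contains "trend_mismatch" then recommendations ++ [hwRec] else recommendations
  let recommendations :=
    if detected_issues.contains "missing_seasonality" then recommendations ++ [etsRec] else recommendations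
  let recommendations :=
    if detected_issues.contains "volatility_mismatch" || detected_issues.contains "magnitude_mismatch"
      then recommendations ++ [holtRec] else recommendations
  -- fallback
  let recommendations := if recommendations.isEmpty then generalRecs else recommendations
  -- r['model'] (the key is always present in every rec built above)
  let existing_models := recommendations.map (fun r => (PySem.Dict.mk r).getD "model" "")
  let recommendations :=
    ["HoltWinters", "AutoETS", "Holt"].foldl
      (fun recs m => if existing_models.contains m then recs else recs ++ [padRec m]) recommendations
  PySem.List.slice recommendations none (some 3)  -- recommendations[:3]

-- ===== PORT B =====
-- B: one lookup in a precomputed 8-entry table keyed by (trend, seasonality, volatility∨magnitude).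
def bRec (m p r : String) : List (String × String) :=
  [("model", m), ("priority", p), ("rationale", r)]

def bPad (m : String) : List (String × String) :=
  bRec m "low" (m ++ " provides alternative forecasting approach for comparison.")

def bHwHigh : List (String × String) :=
  bRec "HoltWinters" "high" "HoltWinters excels at capturing both trend and seasonal patterns, addressing the detected trend mismatch issue."
def bEtsHigh : List (String × String) :=
  bRec "AutoETS" "high" "AutoETS automatically selects optimal exponential smoothing with seasonal components, perfect for seasonality issues."
def bHoltMed : List (String × String) :=
  bRec "Holt" "medium" "Holt method provides balanced trend modeling with appropriate smoothing for volatility concerns."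

def bTable (t s h : Bool) : List (List (String × String)) :=
  match t, s, h with
  | false, false, false =>
      [bRec "AutoETS" "medium" "AutoETS provides robust automatic model selection for general forecasting improvements.",
       bRec "HoltWinters" "medium" "HoltWinters offers comprehensive trend and seasonal modeling capabilities.",
       bRec "Holt" "low" "Holt method provides simple yet effective trend-based forecasting."]
  | false, false, true  => [bHoltMed, bPad "HoltWinters", bPad "AutoETS"]
  | false, true,  false => [bEtsHigh, bPad "HoltWinters", bPad "Holt"]
  | false, true,  true  => [bEtsHigh, bHoltMed, bPad "HoltWinters"]
  | true,  false, false => [bHwHigh, bPad "AutoETS", bPad "Holt"]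
  | true,  false, true  => [bHwHigh, bHoltMed, bPad "AutoETS"]
  | true,  true,  false => [bHwHigh, bEtsHigh, bPad "Holt"]
  | true,  true,  true  => [bHwHigh, bEtsHigh, bHoltMed]

def recommend_models_py_alt (diagnostics : List (String × List (String × Bool))) (current_model : String) : List (List (String × String)) :=
  bTable (pyDetected diagnostics "trend_mismatch")
         (pyDetected diagnostics "missing_seasonality")
         (pyDetected diagnostics "volatility_mismatch" || pyDetected diagnostics "magnitude_mismatch")

-- ===== PRECONDITION & SPEC =====
def Spec_recommend_models_py (diagnostics : List (String × List (String × Bool))) (current_model : String) (out : List (List (String × String))) : Prop := out = recommend_models_py_alt diagnostics current_model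
instance (diagnostics : List (String × List (String × Bool))) (current_model : String) (out : List (List (String × String))) : Decidable (Spec_recommend_models_py diagnostics current_model out) := by unfold Spec_recommend_models_py; infer_instance

-- ===== CLAIM =====
def Claim_equal_recommend_models_py : Prop := ∀ (diagnostics : List (String × List (String × Bool))) (current_model : String), Dom_recommend_models_py diagnostics current_model → Spec_recommend_models_py diagnostics current_model (recommend_models_py diagnostics current_model)

-- ===== LEMMAS AND PROOFS =====

-- ===== VERDICT =====
theorem recommend_models_py_spec : Claim_equal_recommend_models_py := by
  intro diagnostics current_model _
  unfold Spec_recommend_models_py recommend_models_py recommend_models_py_alt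
  cases h1 : pyDetected diagnostics "trend_mismatch" <;>
    cases h2 : pyDetected diagnostics "missing_seasonality" <;>
      cases h3 : pyDetected diagnostics "volatility_mismatch" <;>
        cases h4 : pyDetected diagnostics "magnitude_mismatch" <;>
          simp [h1, h2, h3, h4, bTable, bRec, bPad, bHwHigh, bEtsHigh, bHoltMed,
                hwRec, etsRec, holtRec, generalRecs, padRec,
                PySem.Dict.getD, PySem.Dict.get?] <;> rfl
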